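-- pv_equiv track=rewrite | github.com/Zhiyuan-511/Evermind | backend/cli_backend.py | select_cli
-- ===== SOURCE A (Python) =====
-- from typing import Any, Callable, Dict, List, Optional, Tuple
--
-- NODE_CLI_PREFERENCE: Dict[str, List[str]] = {
--     # v7.1i (maintainer 2026-04-25): Kimi + Qwen added.
--     # Kimi (Moonshot K2.6) is best at Chinese-language coding tasks.
--     # Qwen (Alibaba) is Gemini-fork with DashScope API; good Chinese fallback.
--     "builder":  ["claude", "codex", "kimi", "qwen", "aider", "gemini"],
--     "debugger": ["claude", "codex", "kimi", "aider", "gemini"],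
--     "merger":   ["claude", "kimi", "codex", "qwen", "gemini"],
--     "reviewer": ["claude", "kimi", "qwen", "gemini", "codex"],
--     "tester":   ["claude", "kimi", "codex", "qwen", "gemini"],
--     "analyst":  ["kimi", "gemini", "qwen", "claude", "codex"],
--     "planner":  ["claude", "kimi", "qwen", "gemini", "codex"],
--     "_default": ["claude", "kimi", "qwen", "codex", "gemini", "aider"],
-- }
--
-- def select_cli(node_type: str, available_clis: List[str],
--                preferred_cli: Optional[str] = None) -> Optional[str]:
--     """Select the best CLI for a given node type.
--     Priority: user preference > node-type preference > first available.
--     """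
--     if preferred_cli and preferred_cli in available_clis:
--         return preferred_cli
--
--     preference_order = NODE_CLI_PREFERENCE.get(
--         node_type,
--         NODE_CLI_PREFERENCE["_default"]
--     )
--     for cli_name in preference_order:
--         if cli_name in available_clis:
--             return cli_name
--
--     return available_clis[0] if available_clis else None
-- ===== SOURCE B (Python) =====
-- from typing import Dict, List, Optional
--
-- NODE_CLI_PREFERENCE: Dict[str, List[str]] = {
--     "builder":  ["claude", "codex", "kimi", "qwen", "aider", "gemini"],
--     "debugger": ["claude", "codex", "kimi", "aider", "gemini"],
--     "merger":   ["claude", "kimi", "codex", "qwen", "gemini"],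
--     "reviewer": ["claude", "kimi", "qwen", "gemini", "codex"],
--     "tester":   ["claude", "kimi", "codex", "qwen", "gemini"],
--     "analyst":  ["kimi", "gemini", "qwen", "claude", "codex"],
--     "planner":  ["claude", "kimi", "qwen", "gemini", "codex"],
--     "_default": ["claude", "kimi", "qwen", "codex", "gemini", "aider"],
-- }
--
-- def select_cli(node_type: str, available_clis: List[str],
--                preferred_cli: Optional[str] = None) -> Optional[str]:
--     """Select the best CLI for a given node type.
--
--     Instead of scanning the availability list once per preference entry,
--     build a rank index for the preference order and take a single pass
--     over available_clis keeping the best-ranked one.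
--     """
--     if preferred_cli and preferred_cli in available_clis:
--         return preferred_cli
--
--     order = NODE_CLI_PREFERENCE.get(node_type, NODE_CLI_PREFERENCE["_default"])
--     rank = {name: i for i, name in enumerate(order)}
--
--     best = None
--     best_rank = 0
--     for cli in available_clis:
--         r = rank.get(cli)
--         if r is not None and (best is None or r < best_rank):
--             best, best_rank = cli, r
--     if best is not None:
--         return best
--     return available_clis[0] if available_clis else None
-- ===== Notes on version B (the rewrite author's own statement) =====
-- stated objective: alternative
-- what changed: Replaces the nested scan (for each preference entry, test membership in available_clis) by building a name-to-rank dict from the preference order once and taking a single pass over available_clis that keeps the element of minimal rank, falling back to available_clis[0].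
import Mathlib
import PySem

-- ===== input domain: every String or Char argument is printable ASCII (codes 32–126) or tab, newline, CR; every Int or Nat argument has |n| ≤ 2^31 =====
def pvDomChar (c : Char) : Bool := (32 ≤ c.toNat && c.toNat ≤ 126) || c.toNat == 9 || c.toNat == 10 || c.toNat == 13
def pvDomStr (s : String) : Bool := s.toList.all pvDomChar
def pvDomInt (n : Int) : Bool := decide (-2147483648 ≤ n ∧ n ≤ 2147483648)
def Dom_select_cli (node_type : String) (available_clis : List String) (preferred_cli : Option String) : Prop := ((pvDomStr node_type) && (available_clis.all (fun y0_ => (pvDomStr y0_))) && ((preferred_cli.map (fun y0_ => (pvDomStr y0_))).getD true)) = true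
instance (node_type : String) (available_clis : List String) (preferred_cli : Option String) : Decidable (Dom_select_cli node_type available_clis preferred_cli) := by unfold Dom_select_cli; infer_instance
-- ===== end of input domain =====

-- B replaces A's nested scan (membership test per preference entry) by a rank dict
-- built from the preference order and one min-rank pass over available_clis; same cost class, alternative structure.

-- shared module-level constant NODE_CLI_PREFERENCE, as the lookup .get(node_type, default)
def prefOrder (node_type : String) : List String :=
  if node_type = "builder" then ["claude", "codex", "kimi", "qwen", "aider", "gemini"]
  else if node_type = "debugger" then ["claude", "codex", "kimi", "aider", "gemini"]
  else if node_type = "merger" then ["claude", "kimi", "codex", "qwen", "gemini"]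
  else if node_type = "reviewer" then ["claude", "kimi", "qwen", "gemini", "codex"]
  else if node_type = "tester" then ["claude", "kimi", "codex", "qwen", "gemini"]
  else if node_type = "analyst" then ["kimi", "gemini", "qwen", "claude", "codex"]
  else if node_type = "planner" then ["claude", "kimi", "qwen", "gemini", "codex"]
  else ["claude", "kimi", "qwen", "codex", "gemini", "aider"]

-- Python truthiness of `preferred_cli and preferred_cli in available_clis`
def prefHit (preferred_cli : Option String) (available_clis : List String) : Bool :=
  match preferred_cli with
  | none => false
  | some p => (!(p == "")) && available_clis.contains p

-- ===== PORT A =====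
-- the `for cli_name in preference_order: if cli_name in available_clis: return cli_name` loop
def findPref : List String → List String → Option String
  | [], _ => none
  | o :: rest, avail => if avail.contains o then some o else findPref rest avail

def select_cli (node_type : String) (available_clis : List String) (preferred_cli : Option String) : Option String :=
  if prefHit preferred_cli available_clis then preferred_cli
  else
    match findPref (prefOrder node_type) available_clis with
    | some o => some o
    | none => match available_clis with
              | [] => none
              | x :: _ => some x

-- ===== PORT B =====
-- rank = {name: i for i, name in enumerate(order)}
def rankDict (order : List String) : PySem.Dict String Int :=
  (PySem.List.enumerate order 0).foldl (fun d p => d.insert p.2 p.1) PySem.Dict.empty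

-- the body of B's single pass: keep the best-ranked candidate seen so far
def stepB (d : PySem.Dict String Int) (s : Option (String × Int)) (cli : String) : Option (String × Int) :=
  match d.get? cli with
  | none => s
  | some r =>
    match s with
    | none => some (cli, r)
    | some (_, br) => if r < br then some (cli, r) else s

def select_cli_alt (node_type : String) (available_clis : List String) (preferred_cli : Option String) : Option String :=
  if prefHit preferred_cli available_clis then preferred_cli
  else
    let d := rankDict (prefOrder node_type)
    match available_clis.foldl (stepB d) none with
    | some (b, _) => some b
    | none => match available_clis with
              | [] => none
              | x :: _ => some x

-- ===== PRECONDITION & SPEC =====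
def Spec_select_cli (node_type : String) (available_clis : List String) (preferred_cli : Option String) (out : Option String) : Prop := out = select_cli_alt node_type available_clis preferred_cli
instance (node_type : String) (available_clis : List String) (preferred_cli : Option String) (out : Option String) : Decidable (Spec_select_cli node_type available_clis preferred_cli out) := by unfold Spec_select_cli; infer_instance

-- ===== CLAIM (what is proved, stated in full; the proofs are below) =====
def Claim_equal_select_cli : Prop := ∀ (node_type : String) (available_clis : List String) (preferred_cli : Option String), Dom_select_cli node_type available_clis preferred_cli → Spec_select_cli node_type available_clis preferred_cli (select_cli node_type available_clis preferred_cli)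

-- ===== LEMMAS AND PROOFS =====

-- every preference order is duplicate-free
theorem prefOrder_nodup (node_type : String) : (prefOrder node_type).Nodup := by
  unfold prefOrder; split_ifs <;> decide

-- characterisation of the rank dict: it maps x to i exactly when x sits at index i of order
theorem rankDict_get?_iff (order : List String) (hnd : order.Nodup) (x : String) (r : Int) :
    (rankDict order).get? x = some r ↔ ∃ (k : Nat) (h : k < order.length), x = order[k] ∧ r = (k : Int) := by
  have hfresh : ∀ p ∈ PySem.List.enumerate order 0, (PySem.Dict.empty (κ := String) (ν := Int)).contains p.2 = false := by
    intro p _; simp [PySem.Dict.contains_empty]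
  have hkeys : ((PySem.List.enumerate order 0).map (fun p => p.2)).Nodup := by
    have := PySem.List.map_snd_enumerate (xs := order) (s := 0)
    simpa [this] using hnd
  have hitems := PySem.Dict.items_foldl_insert_fresh (l := PySem.List.enumerate order 0)
    (k := fun p => p.2) (v := fun p => p.1) (d := PySem.Dict.empty) hfresh hkeys
  have hkn : (rankDict order).keys.Nodup := by
    apply PySem.Dict.nodup_keys_foldl_insert_key
    exact PySem.Dict.nodup_keys_empty
  have hitems' : (rankDict order).items = (PySem.List.enumerate order 0).map (fun p => (p.2, p.1)) := by
    unfold rankDict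
    simpa using hitems
  rw [PySem.Dict.get?_eq_some_iff_mem_items _ _ _ hkn, hitems']
  constructor
  · intro hmem
    rcases List.mem_map.1 hmem with ⟨p, hp, hpe⟩
    rcases (PySem.List.mem_enumerate_iff _ _ _).1 hp with ⟨k, hk, hpk⟩
    refine ⟨k, hk, ?_, ?_⟩ <;> · subst hpk; cases hpe; simp_all
  · rintro ⟨k, hk, hx, hr⟩
    refine List.mem_map.2 ⟨((0 : Int) + (k : Int), order[k]), ?_, by simp [hx, hr]⟩
    exact (PySem.List.mem_enumerate_iff _ _ _).2 ⟨k, hk, rfl⟩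

-- invariant carried by B's fold over available_clis
def GoodState (rk : String → Option Int) (seen : List String) (s : Option (String × Int)) : Prop :=
  (s = none → ∀ x ∈ seen, rk x = none) ∧
  (∀ b r, s = some (b, r) → b ∈ seen ∧ rk b = some r ∧ ∀ x ∈ seen, ∀ rx, rk x = some rx → r ≤ rx)

theorem goodState_step (d : PySem.Dict String Int) (seen : List String) (s : Option (String × Int)) (x : String)
    (hg : GoodState (d.get?) seen s) : GoodState (d.get?) (seen ++ [x]) (stepB d s x) := by
  obtain ⟨hnone, hsome⟩ := hg
  unfold stepB
  cases hx : d.get? x with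
  | none =>
    refine ⟨fun hs y hy => ?_, fun b r hs => ?_⟩
    · rcases List.mem_append.1 hy with hy | hy
      · exact hnone hs y hy
      · simp only [List.mem_singleton] at hy; subst hy; exact hx
    · obtain ⟨hb, hrb, hmin⟩ := hsome b r hs
      refine ⟨List.mem_append.2 (Or.inl hb), hrb, fun y hy ry hry => ?_⟩
      rcases List.mem_append.1 hy with hy | hy
      · exact hmin y hy ry hry
      · simp only [List.mem_singleton] at hy; subst hy; rw [hx] at hry; cases hry
  | some r =>
    cases s with
    | none =>
      refine ⟨by simp, fun b rb hs => ?_⟩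
      cases hs
      refine ⟨List.mem_append.2 (Or.inr (by simp)), hx, fun y hy ry hry => ?_⟩
      rcases List.mem_append.1 hy with hy | hy
      · rw [hnone rfl y hy] at hry; cases hry
      · simp only [List.mem_singleton] at hy; subst hy; rw [hx] at hry; cases hry; exact le_refl _
    | some p =>
      obtain ⟨b0, br⟩ := p
      obtain ⟨hb0, hrb0, hmin0⟩ := hsome b0 br rfl
      by_cases hlt : r < br
      · simp only [if_pos hlt]
        refine ⟨by simp, fun b rb hs => ?_⟩
        cases hs
        refine ⟨List.mem_append.2 (Or.inr (by simp)), hx, fun y hy ry hry => ?_⟩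
        rcases List.mem_append.1 hy with hy | hy
        · exact le_trans (le_of_lt hlt) (hmin0 y hy ry hry)
        · simp only [List.mem_singleton] at hy; subst hy; rw [hx] at hry; cases hry; exact le_refl _
      · simp only [if_neg hlt]
        refine ⟨by simp, fun b rb hs => ?_⟩
        cases hs
        refine ⟨List.mem_append.2 (Or.inl hb0), hrb0, fun y hy ry hry => ?_⟩
        rcases List.mem_append.1 hy with hy | hy
        · exact hmin0 y hy ry hry
        · simp only [List.mem_singleton] at hy; subst hy; rw [hx] at hry; cases hry
          exact le_of_not_gt hlt

theorem goodState_foldl (d : PySem.Dict String Int) :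
    ∀ (avail seen : List String) (s : Option (String × Int)), GoodState (d.get?) seen s →
      GoodState (d.get?) (seen ++ avail) (avail.foldl (stepB d) s) := by
  intro avail
  induction avail with
  | nil => intro seen s hg; simpa using hg
  | cons x xs ih =>
    intro seen s hg
    have := ih (seen ++ [x]) (stepB d s x) (goodState_step d seen s x hg)
    simpa [List.append_assoc] using this

theorem goodState_result (d : PySem.Dict String Int) (avail : List String) :
    GoodState (d.get?) avail (avail.foldl (stepB d) none) := by
  have := goodState_foldl d avail [] none ⟨fun _ y hy => absurd hy (List.not_mem_nil), fun b r h => by cases h⟩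
  simpa using this

-- characterisation of A's loop
theorem findPref_none_iff (order avail : List String) :
    findPref order avail = none ↔ ∀ o ∈ order, o ∉ avail := by
  induction order with
  | nil => simp [findPref]
  | cons o rest ih =>
    by_cases h : avail.contains o
    · simp [findPref, List.contains_iff_mem.1 h]
    · simp only [findPref, if_neg h, ih, List.mem_cons]
      constructor
      · rintro hall y (rfl | hy)
        · exact fun hmem => h (List.contains_iff_mem.2 hmem)
        · exact hall y hy
      · intro hall y hy; exact hall y (Or.inr hy)

theorem findPref_some (order avail : List String) (o : String) (h : findPref order avail = some o) :
    ∃ (i : Nat) (hi : i < order.length), order[i] = o ∧ o ∈ avail ∧ ∀ j (hj : j < order.length), j < i → order[j] ∉ avail := by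
  induction order with
  | nil => cases h
  | cons a rest ih =>
    by_cases ha : avail.contains a
    · rw [findPref, if_pos ha] at h
      cases h
      exact ⟨0, by simp, rfl, List.contains_iff_mem.1 ha, fun j hj hj0 => absurd hj0 (by omega)⟩
    · rw [findPref, if_neg ha] at h
      rcases ih h with ⟨i, hi, hio, hoav, hmin⟩
      refine ⟨i + 1, by simpa using hi, by simpa using hio, hoav, ?_⟩
      intro j hj hji
      cases j with
      | zero => simpa using fun hmem => ha (List.contains_iff_mem.2 hmem)
      | succ j' => exact hmin j' (by simpa using hj) (by omega)

-- the core equivalence: first preference hit = min-rank element of avail (both with the same fallback)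
theorem core_eq (order avail : List String) (hnd : order.Nodup) :
    findPref order avail = (avail.foldl (stepB (rankDict order)) none).map Prod.fst := by
  obtain ⟨hgnone, hgsome⟩ := goodState_result (rankDict order) avail
  cases hA : findPref order avail with
  | none =>
    have hnoav : ∀ o ∈ order, o ∉ avail := (findPref_none_iff order avail).1 hA
    cases hB : avail.foldl (stepB (rankDict order)) none with
    | none => rfl
    | some p =>
      obtain ⟨b, r⟩ := p
      obtain ⟨hb, hrb, _⟩ := hgsome b r hB
      rcases (rankDict_get?_iff order hnd b r).1 hrb with ⟨k, hk, hbk, _⟩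
      exact absurd hb (hnoav b (hbk ▸ List.getElem_mem hk))
  | some o =>
    rcases findPref_some order avail o hA with ⟨i, hi, hio, hoav, hmin⟩
    have hro : (rankDict order).get? o = some (i : Int) :=
      (rankDict_get?_iff order hnd o (i : Int)).2 ⟨i, hi, hio.symm, rfl⟩
    cases hB : avail.foldl (stepB (rankDict order)) none with
    | none =>
      rw [hgnone hB o hoav] at hro; cases hro
    | some p =>
      obtain ⟨b, r⟩ := p
      obtain ⟨hb, hrb, hminB⟩ := hgsome b r hB
      rcases (rankDict_get?_iff order hnd b r).1 hrb with ⟨k, hk, hbk, hrk⟩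
      have hri : r ≤ (i : Int) := hminB o hoav (i : Int) hro
      have hki : ¬ k < i := fun hlt => hmin k hk hlt (hbk ▸ hb)
      have : k = i := by omega
      subst this
      simp [hbk ▸ hio]

-- ===== VERDICT (by name: the statement is the Claim_ definition above) =====
theorem select_cli_spec : Claim_equal_select_cli := by
  intro node_type available_clis preferred_cli _
  unfold Spec_select_cli select_cli select_cli_alt
  by_cases hp : prefHit preferred_cli available_clis
  · simp [hp]
  · simp only [if_neg hp]
    rw [core_eq (prefOrder node_type) available_clis (prefOrder_nodup node_type)]
    cases h : available_clis.foldl (stepB (rankDict (prefOrder node_type))) none with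
    | none => simp
    | some p => obtain ⟨b, r⟩ := p; simp
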